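-- pv_equiv track=rewrite | github.com/bengeek06/basic-io-api-waterfall | app/resources/export_csv.py | _get_all_fieldnames
-- ===== SOURCE A (Python) =====
-- from typing import Any, Dict, List, Optional
--
-- def _get_all_fieldnames(records: List[Dict[str, str]]) -> List[str]:
--     """Get all unique field names from records.
--
--     Args:
--         records: List of flattened records
--
--     Returns:
--         Sorted list of unique field names
--     """
--     fieldnames = set()
--     for record in records:
--         fieldnames.update(record.keys())
--
--     # Put _original_id and id first if present
--     ordered = []
--     for priority_field in ["_original_id", "id"]:
--         if priority_field in fieldnames:
--             ordered.append(priority_field)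
--             fieldnames.remove(priority_field)
--
--     # Add remaining fields in sorted order
--     ordered.extend(sorted(fieldnames))
--     return ordered
-- ===== SOURCE B (Python) =====
-- from typing import Dict, List
--
--
-- def _get_all_fieldnames(records: List[Dict[str, str]]) -> List[str]:
--     """Get all unique field names: _original_id, id first, rest sorted."""
--     rank = {"_original_id": 0, "id": 1}
--     fieldnames = {key for record in records for key in record}
--     return sorted(fieldnames, key=lambda f: (rank.get(f, 2), f))
-- ===== Notes on version B (the rewrite author's own statement) =====
-- stated objective: simpler
-- what changed: The explicit priority-extraction loop with set.remove bookkeeping and a separate sort-then-extend is replaced by one keyed sort over the union set, using rank (0 for _original_id, 1 for id, 2 otherwise) and the field name as a tuple sort key.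
import Mathlib
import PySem

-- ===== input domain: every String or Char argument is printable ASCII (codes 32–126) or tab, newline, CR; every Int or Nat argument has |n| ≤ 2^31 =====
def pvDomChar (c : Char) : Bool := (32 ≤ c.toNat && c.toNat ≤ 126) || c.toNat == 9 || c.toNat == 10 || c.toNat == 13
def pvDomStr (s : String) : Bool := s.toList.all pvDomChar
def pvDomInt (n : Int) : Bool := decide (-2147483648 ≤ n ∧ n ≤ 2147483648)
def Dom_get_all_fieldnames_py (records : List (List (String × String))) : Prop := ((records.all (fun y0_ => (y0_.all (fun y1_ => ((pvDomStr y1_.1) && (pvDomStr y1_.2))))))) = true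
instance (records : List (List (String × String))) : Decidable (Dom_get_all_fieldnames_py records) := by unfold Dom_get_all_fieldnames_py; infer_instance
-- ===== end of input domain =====

-- B replaces A's priority-extraction loop + set.remove + separate sort-and-extend
-- by a single keyed sort (rank 0/1/2, then the field name); same cost, simpler shape.

-- ===== PORT A =====
-- fieldnames = set(); for record in records: fieldnames.update(record.keys())
-- then the priority loop (membership check, append, remove), then sorted remainder.
def get_all_fieldnames_py (records : List (List (String × String))) : List String :=
  let fieldnames : PySem.Set String :=
    records.foldl (fun s record => PySem.Set.update s (record.map Prod.fst)) PySem.Set.empty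
  let p : List String × PySem.Set String :=
    ["_original_id", "id"].foldl
      (fun p pf =>
        if PySem.Set.contains p.2 pf then
          -- fieldnames.remove(pf): pf is known present here, so remove = discard
          (p.1 ++ [pf], PySem.Set.discard p.2 pf)
        else p)
      ([], fieldnames)
  p.1 ++ PySem.List.sorted p.2 (fun x => x) false

-- ===== PORT B =====
-- rank = {"_original_id": 0, "id": 1}; one set comprehension; one keyed sort.
-- Python's tuple key (rank.get(f, 2), f) is ported with sorted2 (lexicographic
-- two-component key, exactly Python's tuple comparison).
def get_all_fieldnames_py_alt (records : List (List (String × String))) : List String :=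
  let rank : PySem.Dict String Int := (PySem.Dict.empty.insert "_original_id" 0).insert "id" 1
  let fieldnames : PySem.Set String :=
    records.foldl (fun s record => record.foldl (fun s' kv => PySem.Set.add s' kv.1) s)
      PySem.Set.empty
  PySem.List.sorted2 fieldnames (fun f => PySem.Dict.getD rank f 2) (fun f => f) false

-- ===== PRECONDITION & SPEC =====
def Spec_get_all_fieldnames_py (records : List (List (String × String))) (out : List String) : Prop := out = get_all_fieldnames_py_alt records
instance (records : List (List (String × String))) (out : List String) : Decidable (Spec_get_all_fieldnames_py records out) := by unfold Spec_get_all_fieldnames_py; infer_instance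

-- ===== CLAIM (what is proved, stated in full; the proofs are below) =====
def Claim_equal_get_all_fieldnames_py : Prop := ∀ (records : List (List (String × String))), Dom_get_all_fieldnames_py records → Spec_get_all_fieldnames_py records (get_all_fieldnames_py records)

-- ===== LEMMAS AND PROOFS =====

-- proof-side helpers: the rank function B's dict encodes, and the lexicographic key
def pvRk (f : String) : Int := if f = "_original_id" then 0 else if f = "id" then 1 else 2

def pvKey (f : String) : Lex (Int × String) := toLex (pvRk f, f)

lemma pvGetD_rank (f : String) :
    PySem.Dict.getD
      (((PySem.Dict.empty : PySem.Dict String Int).insert "_original_id" 0).insert "id" 1) f 2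
    = pvRk f := by
  by_cases h1 : f = "_original_id"
  · subst h1; decide
  · by_cases h2 : f = "id"
    · subst h2; decide
    · simp [PySem.Dict.getD, PySem.Dict.get?, PySem.Dict.insert, PySem.Dict.empty, pvRk,
        h1, h2, Ne.symm h1, Ne.symm h2]

lemma pvRk_eq_two {f : String} (h1 : f ≠ "_original_id") (h2 : f ≠ "id") : pvRk f = 2 := by
  simp [pvRk, h1, h2]

lemma pvKey_lt_iff (a b : String) :
    pvKey a < pvKey b ↔ (pvRk a < pvRk b ∨ (pvRk a = pvRk b ∧ a < b)) := by
  simp only [pvKey, Prod.Lex.lt_iff]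
  rfl

lemma pvKey_lt {a b : String} (h : pvRk a < pvRk b) : pvKey a < pvKey b :=
  (pvKey_lt_iff a b).mpr (Or.inl h)

-- B's two-component sort is the sort by the lexicographic key pvKey
lemma pvAlt_sorted_eq (xs : List String) :
    PySem.List.sorted2 xs
      (fun f => PySem.Dict.getD
        (((PySem.Dict.empty : PySem.Dict String Int).insert "_original_id" 0).insert "id" 1) f 2)
      (fun f => f) false
    = PySem.List.sorted xs pvKey false := by
  rw [PySem.List.sorted_eq_foldl_insertBy]
  show List.foldl
      (fun acc x => PySem.List.insertBy
        (fun a b =>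
          decide (PySem.Dict.getD
              (((PySem.Dict.empty : PySem.Dict String Int).insert "_original_id" 0).insert "id" 1) a 2
            < PySem.Dict.getD
              (((PySem.Dict.empty : PySem.Dict String Int).insert "_original_id" 0).insert "id" 1) b 2) ||
          (!decide (PySem.Dict.getD
              (((PySem.Dict.empty : PySem.Dict String Int).insert "_original_id" 0).insert "id" 1) b 2
            < PySem.Dict.getD
              (((PySem.Dict.empty : PySem.Dict String Int).insert "_original_id" 0).insert "id" 1) a 2) &&
           decide (a < b))) x acc) [] xs
    = _
  congr 1
  funext acc x
  congr 1
  funext a b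
  simp only [pvGetD_rank]
  have hiff : (pvRk a < pvRk b ∨ (¬pvRk b < pvRk a ∧ a < b)) ↔ pvKey a < pvKey b := by
    rw [pvKey_lt_iff]
    constructor
    · rintro (h | ⟨h, h2⟩)
      · exact Or.inl h
      · by_cases hab : pvRk a < pvRk b
        · exact Or.inl hab
        · exact Or.inr ⟨le_antisymm (not_lt.mp h) (not_lt.mp hab), h2⟩
    · rintro (h | ⟨h, h2⟩)
      · exact Or.inl h
      · exact Or.inr ⟨by omega, h2⟩
  rw [Bool.eq_iff_iff]
  simp only [Bool.or_eq_true, Bool.and_eq_true, Bool.not_eq_true', decide_eq_false_iff_not,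
    decide_eq_true_eq]
  exact hiff

-- the identity-sorted remainder is pairwise strictly pvKey-increasing when every rank is 2
lemma pvPairwise_sorted_id (R : List String) (hR : R.Nodup) (h2 : ∀ f ∈ R, pvRk f = 2) :
    (PySem.List.sorted R (fun x => x) false).Pairwise (fun a b => pvKey a < pvKey b) := by
  have hle := PySem.List.sorted_pairwise R (fun x => x)
  have hnd : (PySem.List.sorted R (fun x => x) false).Nodup :=
    ((PySem.List.sorted_perm R (fun x => x) false).nodup_iff).mpr hR
  refine (hle.and hnd).imp_of_mem ?_
  intro a b ha hb hab
  rw [PySem.List.mem_sorted] at ha hb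
  refine (pvKey_lt_iff a b).mpr (Or.inr ?_)
  exact ⟨by rw [h2 a ha, h2 b hb], lt_of_le_of_ne hab.1 hab.2⟩

lemma pvDiscard_erase {l : List String} (h : l.Nodup) (a : String) :
    PySem.Set.discard l a = l.erase a := by
  rw [List.Nodup.erase_eq_filter h]; rfl

-- the heart: on any duplicate-free key set S, A's priority loop + sorted remainder
-- equals the single pvKey-sort
lemma pvMain (S : List String) (hS : S.Nodup) :
    (let p : List String × PySem.Set String :=
      ["_original_id", "id"].foldl
        (fun p pf =>
          if PySem.Set.contains p.2 pf then (p.1 ++ [pf], PySem.Set.discard p.2 pf) else p)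
        ([], S)
     p.1 ++ PySem.List.sorted p.2 (fun x => x) false)
    = PySem.List.sorted S pvKey false := by
  have hne : ("_original_id" : String) ≠ "id" := by decide
  simp only [List.foldl, PySem.Set.contains, List.contains_iff_mem]
  by_cases h1 : ("_original_id" : String) ∈ S <;> by_cases h2 : ("id" : String) ∈ S
  · -- both present
    have h2' : ("id" : String) ∈ S.erase "_original_id" := (List.mem_erase_of_ne hne.symm).mpr h2
    have hndE : (S.erase "_original_id").Nodup := hS.erase _
    rw [if_pos h1, pvDiscard_erase hS]
    rw [if_pos h2', pvDiscard_erase hndE]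
    set R := (S.erase "_original_id").erase "id" with hRdef
    have hRnd : R.Nodup := hndE.erase _
    have hmemR : ∀ f ∈ R, f ≠ "_original_id" ∧ f ≠ "id" := by
      intro f hf
      constructor
      · intro he; subst he
        exact (List.Nodup.not_mem_erase hS) (List.mem_of_mem_erase hf)
      · intro he; subst he; exact (List.Nodup.not_mem_erase hndE) hf
    symm
    apply PySem.List.sorted_eq_of_perm_of_pairwise_lt
    · show ("_original_id" :: "id" :: PySem.List.sorted R (fun x => x) false).Perm S
      have hp : S.Perm ("_original_id" :: "id" :: R) :=
        (List.perm_cons_erase h1).trans (List.Perm.cons _ (List.perm_cons_erase h2'))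
      exact (List.Perm.cons _ (List.Perm.cons _ (PySem.List.sorted_perm R _ false))).trans hp.symm
    · show List.Pairwise _ ("_original_id" :: "id" :: PySem.List.sorted R (fun x => x) false)
      refine List.pairwise_cons.mpr ⟨?_, List.pairwise_cons.mpr ⟨?_, ?_⟩⟩
      · intro b hb
        rcases List.mem_cons.mp hb with hb | hb
        · subst hb; exact pvKey_lt (by simp [pvRk])
        · rw [PySem.List.mem_sorted] at hb
          obtain ⟨hb1, hb2⟩ := hmemR b hb
          exact pvKey_lt (by rw [pvRk_eq_two hb1 hb2]; simp [pvRk])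
      · intro b hb
        rw [PySem.List.mem_sorted] at hb
        obtain ⟨hb1, hb2⟩ := hmemR b hb
        exact pvKey_lt (by rw [pvRk_eq_two hb1 hb2]; simp [pvRk])
      · exact pvPairwise_sorted_id R hRnd (fun f hf => pvRk_eq_two (hmemR f hf).1 (hmemR f hf).2)
  · -- only _original_id present
    have h2' : ("id" : String) ∉ S.erase "_original_id" := fun h => h2 (List.mem_of_mem_erase h)
    rw [if_pos h1, pvDiscard_erase hS, if_neg h2']
    set R := S.erase "_original_id" with hRdef
    have hmemR : ∀ f ∈ R, f ≠ "_original_id" ∧ f ≠ "id" := by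
      intro f hf
      refine ⟨fun he => ?_, fun he => ?_⟩
      · subst he; exact (List.Nodup.not_mem_erase hS) hf
      · subst he; exact h2' hf
    symm
    apply PySem.List.sorted_eq_of_perm_of_pairwise_lt
    · show ("_original_id" :: PySem.List.sorted R (fun x => x) false).Perm S
      exact (List.Perm.cons _ (PySem.List.sorted_perm R _ false)).trans
        (List.perm_cons_erase h1).symm
    · show List.Pairwise _ ("_original_id" :: PySem.List.sorted R (fun x => x) false)
      refine List.pairwise_cons.mpr ⟨?_, ?_⟩
      · intro b hb
        rw [PySem.List.mem_sorted] at hb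
        obtain ⟨hb1, hb2⟩ := hmemR b hb
        exact pvKey_lt (by rw [pvRk_eq_two hb1 hb2]; simp [pvRk])
      · exact pvPairwise_sorted_id R (hS.erase _)
          (fun f hf => pvRk_eq_two (hmemR f hf).1 (hmemR f hf).2)
  · -- only id present
    rw [if_neg h1, if_pos h2, pvDiscard_erase hS]
    set R := S.erase "id" with hRdef
    have hmemR : ∀ f ∈ R, f ≠ "_original_id" ∧ f ≠ "id" := by
      intro f hf
      refine ⟨fun he => ?_, fun he => ?_⟩
      · subst he; exact h1 (List.mem_of_mem_erase hf)
      · subst he; exact (List.Nodup.not_mem_erase hS) hf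
    symm
    apply PySem.List.sorted_eq_of_perm_of_pairwise_lt
    · show ("id" :: PySem.List.sorted R (fun x => x) false).Perm S
      exact (List.Perm.cons _ (PySem.List.sorted_perm R _ false)).trans
        (List.perm_cons_erase h2).symm
    · show List.Pairwise _ ("id" :: PySem.List.sorted R (fun x => x) false)
      refine List.pairwise_cons.mpr ⟨?_, ?_⟩
      · intro b hb
        rw [PySem.List.mem_sorted] at hb
        obtain ⟨hb1, hb2⟩ := hmemR b hb
        exact pvKey_lt (by rw [pvRk_eq_two hb1 hb2]; simp [pvRk])
      · exact pvPairwise_sorted_id R (hS.erase _)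
          (fun f hf => pvRk_eq_two (hmemR f hf).1 (hmemR f hf).2)
  · -- neither present
    rw [if_neg h1, if_neg h2]
    have hmemR : ∀ f ∈ S, f ≠ "_original_id" ∧ f ≠ "id" := by
      intro f hf
      exact ⟨fun he => h1 (he ▸ hf), fun he => h2 (he ▸ hf)⟩
    symm
    apply PySem.List.sorted_eq_of_perm_of_pairwise_lt
    · show ([] ++ PySem.List.sorted S (fun x => x) false).Perm S
      simpa using PySem.List.sorted_perm S (fun x => x) false
    · show List.Pairwise _ ([] ++ PySem.List.sorted S (fun x => x) false)
      simpa using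
        pvPairwise_sorted_id S hS (fun f hf => pvRk_eq_two (hmemR f hf).1 (hmemR f hf).2)

-- both ports build the same key set: the union, in first-insertion order
lemma pvSetA (records : List (List (String × String))) :
    records.foldl (fun s record => PySem.Set.update s (record.map Prod.fst)) PySem.Set.empty
    = PySem.Set.ofList (records.flatMap (fun r => r.map Prod.fst)) := by
  rw [PySem.Set.ofList_eq_foldl, List.foldl_flatMap]
  rfl

lemma pvSetB (records : List (List (String × String))) :
    records.foldl (fun s record => record.foldl (fun s' kv => PySem.Set.add s' kv.1) s)
      PySem.Set.empty
    = PySem.Set.ofList (records.flatMap (fun r => r.map Prod.fst)) := by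
  rw [PySem.Set.ofList_eq_foldl, List.foldl_flatMap]
  simp only [List.foldl_map]
  rfl

-- ===== VERDICT (by name: the statement is the Claim_ definition above) =====
theorem get_all_fieldnames_py_spec : Claim_equal_get_all_fieldnames_py := by
  intro records _
  unfold Spec_get_all_fieldnames_py get_all_fieldnames_py get_all_fieldnames_py_alt
  simp only [pvSetA, pvSetB, pvAlt_sorted_eq]
  exact pvMain _ (PySem.Set.nodup_ofList _)
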